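-- pv_equiv track=rewrite | github.com/PermutaTriangle/PermStruct | experiment.py | contains_mesh_pattern
-- ===== SOURCE A (Python) =====
-- import bisect
--
-- def contains_mesh_pattern(p, patt):
--     (q, s) = patt
--     s = set(s)
--
--     def flatten(x):
--         n = len(x)
--         res = list(range(n))
--         for at, (k, i) in enumerate(sorted( (x[i], i) for i in range(n) )):
--             res[i] = at
--         return res
--
--     def contains(i, now):
--         if len(now) == len(q):
--             st = sorted(now)
--             x = 0
--             for k in p:
--                 if x < len(now) and k == now[x]:
--                     x += 1
--                 else:
--                     y = bisect.bisect_left(st, k)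
--                     if (x,y) in s:
--                         return False
--             return True
--
--         if i == len(p):
--             return False
--
--         nxt = now + [p[i]]
--         if flatten(nxt) == flatten(q[:len(nxt)]):
--             if contains(i+1, nxt):
--                 return True
--
--         return contains(i+1, now)
--
--     return contains(0, [])
-- ===== SOURCE B (Python) =====
-- def _flatten(x):
--     # rank of each entry = number of (value, index) pairs lexicographically below it
--     n = len(x)
--     return [sum(1 for j in range(n) if (x[j], j) < (x[i], i)) for i in range(n)]
--
--
-- def _subseqs(xs, r):
--     # all length-r subsequences of xs (each index combination once)
--     if r == 0:
--         yield []
--         return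
--     if not xs:
--         return
--     head, tail = xs[0], xs[1:]
--     for c in _subseqs(tail, r - 1):
--         yield [head] + c
--     yield from _subseqs(tail, r)
--
--
-- def _mesh_ok(p, s, now):
--     x = 0
--     for k in p:
--         if x < len(now) and k == now[x]:
--             x += 1
--         else:
--             y = sum(1 for v in now if v < k)
--             if (x, y) in s:
--                 return False
--     return True
--
--
-- def contains_mesh_pattern(p, patt):
--     (q, s) = patt
--     s = set(s)
--     fq = _flatten(q)
--     return any(_flatten(sub) == fq and _mesh_ok(p, s, sub)
--                for sub in _subseqs(p, len(q)))
-- ===== Notes on version B (the rewrite author's own statement) =====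
-- stated objective: alternative
-- what changed: Replaces A's pruned recursive backtracking (incremental prefix order-isomorphism tests, sorted/bisect rank lookup in the mesh scan) with a flat generate-and-test enumeration: every length-len(q) subsequence of p is enumerated structurally, the pattern normalization flatten(q) is precomputed once and compared against a direct counting-based flatten of each subsequence, and the mesh scan computes ranks by counting smaller chosen values instead of sorting plus bisect.
import Mathlib
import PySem

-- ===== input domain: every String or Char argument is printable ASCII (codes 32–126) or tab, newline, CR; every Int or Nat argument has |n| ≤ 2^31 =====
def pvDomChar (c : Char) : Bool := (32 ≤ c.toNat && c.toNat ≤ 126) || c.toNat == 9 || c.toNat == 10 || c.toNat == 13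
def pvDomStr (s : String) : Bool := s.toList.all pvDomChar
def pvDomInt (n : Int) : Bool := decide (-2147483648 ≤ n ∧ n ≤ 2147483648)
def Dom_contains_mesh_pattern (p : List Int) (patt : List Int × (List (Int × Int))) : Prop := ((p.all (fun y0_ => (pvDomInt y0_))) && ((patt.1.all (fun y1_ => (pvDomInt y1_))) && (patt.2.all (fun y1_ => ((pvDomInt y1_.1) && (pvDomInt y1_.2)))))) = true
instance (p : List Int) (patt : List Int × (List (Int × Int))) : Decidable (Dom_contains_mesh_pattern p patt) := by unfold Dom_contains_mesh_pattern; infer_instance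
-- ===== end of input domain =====

-- B replaces A's pruned recursive backtracking by a flat enumeration of all length-len(q)
-- subsequences with a counting-based flatten and a counting-based mesh scan (objective: alternative;
-- equivalence is about the return value; neither program mutates its arguments).

-- ===== PORT A =====

-- flatten(x): sorted((x[i], i) for i in range(n)) — Python sorts int pairs lexicographically,
-- which is exactly the Lex order on Int × Int; res[i] = at with 0 ≤ i < n, so List.set is exact.
def pvFlattenA (x : List Int) : List Int :=
  let n := x.length
  let pairs := (List.range n).map (fun i => ((x.getD i 0 : Int), (i : Int)))  -- x[i], 0 ≤ i < n: getD is exact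
  let sp := PySem.List.sorted pairs (fun t => toLex t) false
  (PySem.List.enumerate sp).foldl (fun res t => res.set t.2.2.toNat t.1)
    ((List.range n).map (fun (i : Nat) => (i : Int)))

-- the scan inside contains() once len(now) == len(q): st = sorted(now), bisect.bisect_left(st, k)
def pvMeshA (now st : List Int) (sS : List (Int × Int)) : List Int → Nat → Bool
  | [], _ => true
  | k :: rest, x =>
    if x < now.length && k == now.getD x 0 then
      pvMeshA now st sS rest (x + 1)
    else
      let y := PySem.List.bisectLeft st k
      if sS.contains ((x : Int), (y : Int)) then false
      else pvMeshA now st sS rest x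

-- contains(i, now); p[i] with i < len(p) is getD (exact)
def pvContainsA (p q : List Int) (sS : List (Int × Int)) (i : Nat) (now : List Int) : Bool :=
  if now.length = q.length then
    pvMeshA now (PySem.List.sorted now (fun v => v) false) sS p 0
  else if _h : p.length ≤ i then false
    -- Python tests i == len(p); contains is only ever called with i ≤ len(p), where the two agree (totality guard)
  else
    let nxt := now ++ [p.getD i 0]
    ((if pvFlattenA nxt == pvFlattenA (q.take nxt.length) then pvContainsA p q sS (i + 1) nxt else false)
      || pvContainsA p q sS (i + 1) now)
termination_by p.length - i
decreasing_by all_goals omega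

def contains_mesh_pattern (p : List Int) (patt : List Int × (List (Int × Int))) : Bool :=
  pvContainsA p patt.1 (PySem.Set.ofList patt.2) 0 []  -- s = set(s)

-- ===== PORT B =====

-- _flatten: rank by directly counting lexicographically smaller (value, index) pairs
def pvFlattenB (x : List Int) : List Int :=
  let n := x.length
  (List.range n).map (fun i =>
    (((List.range n).countP
        (fun j => decide (toLex ((x.getD j 0 : Int), (j : Int)) < toLex ((x.getD i 0 : Int), (i : Int))))) : Int))

-- _subseqs: all length-r subsequences, cons-structure recursion
def pvSubseqs : List Int → Nat → List (List Int)
  | _, 0 => [[]]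
  | [], _ + 1 => []
  | x :: rest, r + 1 => (pvSubseqs rest r).map (x :: ·) ++ pvSubseqs rest (r + 1)

-- _mesh_ok: y = sum(1 for v in now if v < k) is a count
def pvMeshB (now : List Int) (sS : List (Int × Int)) : List Int → Nat → Bool
  | [], _ => true
  | k :: rest, x =>
    if x < now.length && k == now.getD x 0 then
      pvMeshB now sS rest (x + 1)
    else
      let y := now.countP (fun v => decide (v < k))
      if sS.contains ((x : Int), (y : Int)) then false
      else pvMeshB now sS rest x

def contains_mesh_pattern_alt (p : List Int) (patt : List Int × (List (Int × Int))) : Bool :=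
  let q := patt.1
  let sS := PySem.Set.ofList patt.2  -- s = set(s)
  let fq := pvFlattenB q
  (pvSubseqs p q.length).any (fun sub => pvFlattenB sub == fq && pvMeshB sub sS p 0)

-- ===== PRECONDITION & SPEC =====
def Spec_contains_mesh_pattern (p : List Int) (patt : List Int × (List (Int × Int))) (out : Bool) : Prop := out = contains_mesh_pattern_alt p patt
instance (p : List Int) (patt : List Int × (List (Int × Int))) (out : Bool) : Decidable (Spec_contains_mesh_pattern p patt out) := by unfold Spec_contains_mesh_pattern; infer_instance

-- ===== CLAIM (what is proved, stated in full; the proofs are below) =====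
def Claim_equal_contains_mesh_pattern : Prop := ∀ (p : List Int) (patt : List Int × (List (Int × Int))), Dom_contains_mesh_pattern p patt → Spec_contains_mesh_pattern p patt (contains_mesh_pattern p patt)

-- ===== LEMMAS AND PROOFS =====

-- ---- the two mesh scans agree: bisect_left on sorted now = count of smaller values ----


theorem pv_bisect_eq_countP (now : List Int) (k : Int) :
    PySem.List.bisectLeft (PySem.List.sorted now (fun v => v) false) k
      = now.countP (fun v => decide (v < k)) := by
  set st := PySem.List.sorted now (fun v => v) false with hst
  have hpw : st.Pairwise (fun a b => a ≤ b) := by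
    simpa using PySem.List.sorted_pairwise now (fun v => v)
  obtain ⟨hb, hlt, hge⟩ := PySem.List.bisectLeft_spec st k hpw
  set b := PySem.List.bisectLeft st k with hbdef
  have hperm : st.Perm now := PySem.List.sorted_perm now (fun v => v) false
  rw [← hperm.countP_eq]
  have hsplit : st = st.take b ++ st.drop b := (List.take_append_drop b st).symm
  have h1 : (st.take b).countP (fun v => decide (v < k)) = b := by
    have hall : ∀ v ∈ st.take b, (fun v => decide (v < k)) v = true := by
      intro v hv
      rw [List.mem_take_iff_getElem] at hv
      obtain ⟨j, hj, rfl⟩ := hv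
      simpa using hlt j (by omega) (by omega)
    rw [List.countP_eq_length.mpr hall, List.length_take]
    omega
  have h2 : (st.drop b).countP (fun v => decide (v < k)) = 0 := by
    rw [List.countP_eq_zero]
    intro v hv
    rw [List.mem_drop_iff_getElem] at hv
    obtain ⟨j, hj, rfl⟩ := hv
    simpa using hge (b + j) (by omega) (by omega)
  have hfin : st.countP (fun v => decide (v < k)) = b := by
    conv_lhs => rw [hsplit]
    rw [List.countP_append, h1, h2]; omega
  exact hfin.symm

theorem pv_countP_pos (l : List (Int × Int)) (hpw : l.Pairwise (fun a b => toLex a < toLex b)) :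
    ∀ (a : Nat) (ha : a < l.length),
      l.countP (fun y => decide (toLex y < toLex l[a])) = a := by
  induction l with
  | nil => intro a ha; simp at ha
  | cons v t ih =>
      intro a ha
      rcases List.pairwise_cons.mp hpw with ⟨hv, ht⟩
      cases a with
      | zero =>
          simp only [List.getElem_cons_zero, List.countP_cons]
          rw [List.countP_eq_zero.mpr ?_]
          · simp
          · intro y hy
            have := hv y hy
            simp only [decide_eq_true_eq]
            intro hlt
            exact absurd (lt_trans hlt this) (lt_irrefl _)
      | succ a =>
          have ha' : a < t.length := by simpa using ha
          simp only [List.getElem_cons_succ, List.countP_cons]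
          have hva : toLex v < toLex t[a] := hv _ (List.getElem_mem ha')
          have := ih ht a ha'
          simp only [hva, decide_eq_true_eq, if_pos]
          exact congrArg (fun z => z + 1) this

theorem pv_countP_pos' (l : List (Int × Int)) (hpw : l.Pairwise (fun a b => toLex a < toLex b))
    (a : Nat) (ha : a < l.length) (v : Int × Int) (hv : l[a] = v) :
    l.countP (fun y => decide (toLex y < toLex v)) = a := by
  subst hv; exact pv_countP_pos l hpw a ha

theorem pv_foldl_set_length (M : List (Int × (Int × Int))) :
    ∀ res0 : List Int, (M.foldl (fun res t => res.set t.2.2.toNat t.1) res0).length = res0.length := by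
  induction M with
  | nil => intro res0; rfl
  | cons u t ih => intro res0; simp [List.foldl_cons, ih]

theorem pv_foldl_set_untouched (L : List (Int × Int)) :
    ∀ (s : Int) (res0 : List Int) (j : Nat), (∀ u ∈ L, u.2.toNat ≠ j) →
      ((PySem.List.enumerate L s).foldl (fun res t => res.set t.2.2.toNat t.1) res0)[j]? = res0[j]? := by
  induction L with
  | nil => intro s res0 j _; simp [PySem.List.enumerate_nil]
  | cons u t ih =>
      intro s res0 j h
      rw [PySem.List.enumerate_cons, List.foldl_cons]
      rw [ih (s+1) _ j (fun u hu => h u (List.mem_cons_of_mem _ hu))]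
      exact List.getElem?_set_ne (h u List.mem_cons_self)

theorem pv_foldl_set_at (L : List (Int × Int)) :
    ∀ (s : Int) (res0 : List Int) (a : Nat) (v : Int × Int), L[a]? = some v →
      (∀ u ∈ L, 0 ≤ u.2) → (L.map (·.2)).Nodup → v.2.toNat < res0.length →
      ((PySem.List.enumerate L s).foldl (fun res t => res.set t.2.2.toNat t.1) res0)[v.2.toNat]?
        = some (s + a) := by
  induction L with
  | nil => intro s res0 a v hv _ _ _; simp at hv
  | cons u t ih =>
      intro s res0 a v hv hnn hnd hlt
      rw [PySem.List.enumerate_cons, List.foldl_cons]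
      simp only [List.map_cons, List.nodup_cons] at hnd
      cases a with
      | zero =>
          simp only [List.getElem?_cons_zero, Option.some_inj] at hv
          subst hv
          rw [pv_foldl_set_untouched t (s+1) _ _ ?_]
          · rw [List.getElem?_set_self (by simpa using hlt)]
            simp
          · intro w hw
            have hne : w.2 ≠ u.2 := by
              intro he; exact hnd.1 (he ▸ List.mem_map_of_mem hw)
            have h1 : 0 ≤ w.2 := hnn w (List.mem_cons_of_mem _ hw)
            have h2 : 0 ≤ u.2 := hnn u List.mem_cons_self
            omega
      | succ a =>
          simp only [List.getElem?_cons_succ] at hv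
          rw [ih (s+1) _ a v hv (fun w hw => hnn w (List.mem_cons_of_mem _ hw)) hnd.2
            (by simpa using hlt)]
          congr 1
          push_cast
          ring

theorem pv_flatten_eq (x : List Int) : pvFlattenA x = pvFlattenB x := by
  simp only [pvFlattenA, pvFlattenB]
  set n := x.length with hn
  set pairs := (List.range n).map (fun i => ((x.getD i 0 : Int), (i : Int))) with hpairs
  set sp := PySem.List.sorted pairs (fun t => toLex t) false with hsp
  have hperm : sp.Perm pairs := PySem.List.sorted_perm pairs (fun t => toLex t) false
  have hsnd : pairs.map (·.2) = (List.range n).map (fun (i : Nat) => (i : Int)) := by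
    rw [hpairs, List.map_map]; rfl
  have hsnd_nodup : (pairs.map (·.2)).Nodup := by
    rw [hsnd]
    exact (List.nodup_range).map (fun a b => by exact_mod_cast id)
  have hpairs_nodup : pairs.Nodup := hsnd_nodup.of_map
  have hsp_snd_nodup : (sp.map (·.2)).Nodup := by
    rw [(hperm.map (·.2)).nodup_iff]; exact hsnd_nodup
  have hsp_nodup : sp.Nodup := hperm.nodup_iff.mpr hpairs_nodup
  have hsp_le : sp.Pairwise (fun a b => toLex a ≤ toLex b) :=
    PySem.List.sorted_pairwise pairs (fun t => toLex t)
  have hsp_lt : sp.Pairwise (fun a b => toLex a < toLex b) := by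
    refine (hsp_le.and hsp_nodup).imp ?_
    rintro a b ⟨hle, hne⟩
    exact lt_of_le_of_ne hle (by simpa using hne)
  have hnn : ∀ u ∈ sp, 0 ≤ u.2 := by
    intro u hu
    have : u ∈ pairs := hperm.mem_iff.mp hu
    simp only [hpairs, List.mem_map, List.mem_range] at this
    obtain ⟨i, _, rfl⟩ := this
    positivity
  have hlenA : ∀ (res0 : List Int),
      ((PySem.List.enumerate sp).foldl (fun res t => res.set t.2.2.toNat t.1) res0).length
        = res0.length := fun res0 => pv_foldl_set_length _ res0
  apply List.ext_getElem?
  intro i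
  by_cases hi : i < n
  · -- pairs[i] sits at some position a in sp
    have hmem : ((x.getD i 0 : Int), (i : Int)) ∈ sp := by
      rw [hperm.mem_iff, hpairs]
      exact List.mem_map_of_mem (by simpa using hi)
    obtain ⟨a, ha, hval⟩ := List.getElem_of_mem hmem
    have hlt : ((x.getD i 0 : Int), (i : Int)).2.toNat < ((List.range n).map (fun (i : Nat) => (i : Int))).length := by
      simpa using hi
    have hA := pv_foldl_set_at sp 0 ((List.range n).map (fun (i : Nat) => (i : Int))) a
      ((x.getD i 0 : Int), (i : Int)) (by rw [List.getElem?_eq_getElem ha]; exact congrArg some hval)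
      hnn hsp_snd_nodup hlt
    have htoNat : (((x.getD i 0 : Int), (i : Int)).2).toNat = i := by simp
    rw [htoNat] at hA
    rw [hA]
    have hcnt : sp.countP (fun y => decide (toLex y < toLex ((x.getD i 0 : Int), (i : Int)))) = a :=
      pv_countP_pos' sp hsp_lt a ha _ hval
    rw [hperm.countP_eq] at hcnt
    rw [hpairs, List.countP_map] at hcnt
    rw [List.getElem?_map, List.getElem?_range hi]
    simp only [Option.map_some]
    rw [zero_add]
    congr 1
    exact_mod_cast hcnt.symm
  · rw [List.getElem?_eq_none, List.getElem?_eq_none]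
    · simpa using hi
    · rw [hlenA]; simpa using hi

theorem pv_countP_lt {α : Type} (l : List α) (p q : α → Bool)
    (h : ∀ z ∈ l, p z = true → q z = true) :
    ∀ x0, x0 ∈ l → q x0 = true → p x0 = false → l.countP p < l.countP q := by
  induction l with
  | nil => intro x0 hx0; simp at hx0
  | cons a t ih =>
      intro x0 hx0 hq hp
      have hmono : t.countP p ≤ t.countP q :=
        List.countP_mono_left (fun z hz => h z (List.mem_cons_of_mem _ hz))
      rcases List.mem_cons.mp hx0 with rfl | hx0
      · rw [List.countP_cons, List.countP_cons, hp, hq]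
        simp only [if_true, Bool.false_eq_true, if_false]
        omega
      · have := ih (fun z hz => h z (List.mem_cons_of_mem _ hz)) x0 hx0 hq hp
        rw [List.countP_cons, List.countP_cons]
        have hpq : p a = true → q a = true := h a List.mem_cons_self
        cases hqa : q a <;> cases hpa : p a <;> simp_all

theorem pv_rank_iff (x : List Int) (i j : Nat) (hi : i < x.length) (hj : j < x.length) :
    (toLex ((x.getD j 0 : Int), (j : Int)) < toLex ((x.getD i 0 : Int), (i : Int)))
      ↔ ((List.range x.length).countP
            (fun k => decide (toLex ((x.getD k 0 : Int), (k : Int)) < toLex ((x.getD j 0 : Int), (j : Int))))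
          < (List.range x.length).countP
            (fun k => decide (toLex ((x.getD k 0 : Int), (k : Int)) < toLex ((x.getD i 0 : Int), (i : Int))))) := by
  constructor
  · intro hlt
    apply pv_countP_lt _ _ _ ?_ j (by simpa using hj) (by simpa using hlt) (by simp)
    intro k _ hk
    simp only [decide_eq_true_eq] at hk ⊢
    exact lt_trans hk hlt
  · intro hcnt
    rcases lt_trichotomy (toLex ((x.getD j 0 : Int), (j : Int))) (toLex ((x.getD i 0 : Int), (i : Int))) with h1 | h1 | h1
    · exact h1
    · exfalso
      have : ((x.getD j 0 : Int), (j : Int)) = ((x.getD i 0 : Int), (i : Int)) := by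
        simpa using h1
      rw [this] at hcnt
      omega
    · exfalso
      have : _ < _ := pv_countP_lt (List.range x.length)
        (fun k => decide (toLex ((x.getD k 0 : Int), (k : Int)) < toLex ((x.getD i 0 : Int), (i : Int))))
        (fun k => decide (toLex ((x.getD k 0 : Int), (k : Int)) < toLex ((x.getD j 0 : Int), (j : Int))))
        (by
          intro k _ hk
          simp only [decide_eq_true_eq] at hk ⊢
          exact lt_trans hk h1)
        i (by simpa using hi) (by simpa using h1) (by simp)
      omega

theorem pv_flattenB_take (x y : List Int) (m : Nat) (hlen : x.length = y.length)
    (h : pvFlattenB x = pvFlattenB y) :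
    pvFlattenB (x.take m) = pvFlattenB (y.take m) := by
  have hcnt : ∀ i, i < x.length →
      (List.range x.length).countP
          (fun k => decide (toLex ((x.getD k 0 : Int), (k : Int)) < toLex ((x.getD i 0 : Int), (i : Int))))
        = (List.range y.length).countP
          (fun k => decide (toLex ((y.getD k 0 : Int), (k : Int)) < toLex ((y.getD i 0 : Int), (i : Int)))) := by
    intro i hi
    have hiy : i < y.length := hlen ▸ hi
    have := congrArg (fun l => l[i]?) h
    simp only [pvFlattenB, List.getElem?_map, List.getElem?_range hi, List.getElem?_range hiy,
      Option.map_some, Option.some_inj] at this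
    exact_mod_cast this
  have hm : (x.take m).length = (y.take m).length := by simp [hlen]
  set m' := (x.take m).length with hm'
  have hm'x : m' ≤ x.length := by simp [hm']
  have hm'm : m' ≤ m := by simp [hm']
  have hgx : ∀ j, j < m' → (x.take m).getD j 0 = x.getD j 0 := by
    intro j hj
    simp only [List.getD, List.getElem?_take]
    rw [if_pos (by omega)]
  have hgy : ∀ j, j < m' → (y.take m).getD j 0 = y.getD j 0 := by
    intro j hj
    simp only [List.getD, List.getElem?_take]
    rw [if_pos (by omega)]
  simp only [pvFlattenB, ← hm', ← hm]
  apply List.map_congr_left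
  intro i hi
  rw [List.mem_range] at hi
  congr 1
  have e1 : (List.range m').countP
        (fun j => decide (toLex (((x.take m).getD j 0 : Int), (j : Int)) < toLex (((x.take m).getD i 0 : Int), (i : Int))))
      = (List.range m').countP
        (fun j => decide (toLex ((x.getD j 0 : Int), (j : Int)) < toLex ((x.getD i 0 : Int), (i : Int)))) := by
    apply List.countP_congr
    intro j hj
    rw [List.mem_range] at hj
    rw [hgx i hi, hgx j hj]
  have e2 : (List.range m').countP
        (fun j => decide (toLex (((y.take m).getD j 0 : Int), (j : Int)) < toLex (((y.take m).getD i 0 : Int), (i : Int))))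
      = (List.range m').countP
        (fun j => decide (toLex ((y.getD j 0 : Int), (j : Int)) < toLex ((y.getD i 0 : Int), (i : Int)))) := by
    apply List.countP_congr
    intro j hj
    rw [List.mem_range] at hj
    rw [hgy i hi, hgy j hj]
  rw [e1, e2]
  apply List.countP_congr
  intro j hj
  rw [List.mem_range] at hj
  have hix : i < x.length := by omega
  have hjx : j < x.length := by omega
  simp only [decide_eq_true_eq]
  rw [pv_rank_iff x i j hix hjx, pv_rank_iff y i j (by omega) (by omega)]
  rw [hcnt i hix, hcnt j hjx]

theorem pv_mesh_eq (now : List Int) (sS : List (Int × Int)) (ks : List Int) (x : Nat) :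
    pvMeshA now (PySem.List.sorted now (fun v => v) false) sS ks x = pvMeshB now sS ks x := by
  induction ks generalizing x with
  | nil => rfl
  | cons k rest ih =>
      simp only [pvMeshA, pvMeshB, pv_bisect_eq_countP]
      split_ifs <;> simp [ih]

-- ---- flattenA = flattenB ----


-- ---- rank characterisation and the prefix lemma ----


-- ---- lengths of enumerated subsequences ----

theorem pv_subseqs_length (xs : List Int) (r : Nat) (c : List Int) (hc : c ∈ pvSubseqs xs r) :
    c.length = r := by
  induction xs generalizing r c with
  | nil => cases r <;> simp_all [pvSubseqs]
  | cons a t ih =>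
      cases r with
      | zero => simp_all [pvSubseqs]
      | succ r =>
          simp only [pvSubseqs, List.mem_append, List.mem_map] at hc
          rcases hc with ⟨d, hd, rfl⟩ | hc
          · simp [ih r d hd]
          · exact ih (r + 1) c hc

-- ---- the recursion of A, re-expressed structurally on the suffix of p ----

def pvGo (p q : List Int) (sS : List (Int × Int)) : List Int → List Int → Bool
  | [], now =>
      if now.length = q.length then pvMeshB now sS p 0 else false
  | a :: t, now =>
      if now.length = q.length then pvMeshB now sS p 0
      else
        ((if pvFlattenB (now ++ [a]) == pvFlattenB (q.take (now.length + 1)) then pvGo p q sS t (now ++ [a]) else false)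
          || pvGo p q sS t now)

theorem pv_containsA_eq_go (p q : List Int) (sS : List (Int × Int)) :
    ∀ i now, i ≤ p.length → pvContainsA p q sS i now = pvGo p q sS (p.drop i) now := by
  suffices H : ∀ (n : Nat) i now, p.length - i = n → i ≤ p.length →
      pvContainsA p q sS i now = pvGo p q sS (p.drop i) now by
    intro i now hi; exact H (p.length - i) i now rfl hi
  intro n
  induction n with
  | zero =>
      intro i now hn hi
      have hie : i = p.length := by omega
      subst hie
      rw [pvContainsA, List.drop_length]
      by_cases hq : now.length = q.length
      · simp only [pvGo, if_pos hq, pv_mesh_eq]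
      · simp [pvGo, hq]
  | succ n ih =>
      intro i now hn hi
      have hlt : i < p.length := by omega
      rw [pvContainsA, List.drop_eq_getElem_cons hlt]
      by_cases hq : now.length = q.length
      · simp only [pvGo, if_pos hq, pv_mesh_eq]
      · rw [if_neg hq]
        rw [dif_neg (by omega)]
        simp only [pvGo, if_neg hq]
        have hgd : p.getD i 0 = p[i] := List.getD_eq_getElem p 0 hlt
        rw [ih (i+1) (now ++ [p.getD i 0]) (by omega) (by omega),
          ih (i+1) now (by omega) (by omega), hgd]
        simp [pv_flatten_eq]

theorem pv_subseqs_zero (xs : List Int) : pvSubseqs xs 0 = [[]] := by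
  cases xs <;> rfl

theorem pv_go_eq_any (p q : List Int) (sS : List (Int × Int)) :
    ∀ rest now, now.length ≤ q.length → pvFlattenB now = pvFlattenB (q.take now.length) →
      pvGo p q sS rest now
        = (pvSubseqs rest (q.length - now.length)).any
            (fun ext => pvFlattenB (now ++ ext) == pvFlattenB q && pvMeshB (now ++ ext) sS p 0) := by
  intro rest
  induction rest with
  | nil =>
      intro now hle hinv
      by_cases hq : now.length = q.length
      · rw [show q.length - now.length = 0 by omega, pv_subseqs_zero]
        have hfq : pvFlattenB now = pvFlattenB q := by
          rw [hinv, hq, List.take_length]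
        simp [pvGo, hq, hfq]
      · have : q.length - now.length = (q.length - now.length - 1) + 1 := by omega
        rw [this]
        simp [pvGo, hq, pvSubseqs]
  | cons a t ih =>
      intro now hle hinv
      by_cases hq : now.length = q.length
      · rw [show q.length - now.length = 0 by omega, pv_subseqs_zero]
        have hfq : pvFlattenB now = pvFlattenB q := by
          rw [hinv, hq, List.take_length]
        simp [pvGo, hq, hfq]
      · have hlt : now.length < q.length := by omega
        have hr : q.length - now.length = (q.length - (now.length + 1)) + 1 := by omega
        rw [hr]
        simp only [pvGo, if_neg hq, pvSubseqs, List.any_append, List.any_map]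
        -- second disjunct: skip a
        rw [← hr, ← ih now hle hinv]
        congr 1
        by_cases hc : pvFlattenB (now ++ [a]) = pvFlattenB (q.take (now.length + 1))
        · rw [if_pos (by simpa using hc)]
          rw [ih (now ++ [a]) (by simp; omega) (by simpa using hc)]
          simp [Function.comp_def, List.append_assoc]
        · rw [if_neg (by simpa using hc)]
          symm
          rw [List.any_eq_false]
          rintro ext hext
          simp only [Function.comp_apply, Bool.and_eq_true, beq_iff_eq, not_and]
          intro hfull
          exfalso
          apply hc
          have hlext : ext.length = q.length - (now.length + 1) := pv_subseqs_length t _ ext hext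
          have hlen2 : (now ++ a :: ext).length = q.length := by
            simp [hlext]; omega
          have := pv_flattenB_take (now ++ a :: ext) q (now.length + 1) hlen2 hfull
          rw [show now ++ a :: ext = (now ++ [a]) ++ ext by simp] at this
          rw [List.take_left' (by simp)] at this
          exact this

-- ===== VERDICT (by name: the statement is the Claim_ definition above) =====
theorem contains_mesh_pattern_spec : Claim_equal_contains_mesh_pattern := by
  intro p patt _hdom
  show contains_mesh_pattern p patt = contains_mesh_pattern_alt p patt
  unfold contains_mesh_pattern contains_mesh_pattern_alt
  rw [pv_containsA_eq_go p patt.1 (PySem.Set.ofList patt.2) 0 [] (by omega), List.drop_zero,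
    pv_go_eq_any p patt.1 (PySem.Set.ofList patt.2) p [] (by simp) (by simp)]
  simp
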